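-- pv_equiv track=rewrite | github.com/egormelyakin/terraria_scraper | script/scraper/scrapers/npcscraper.py | parse_npc_environment
-- ===== SOURCE A (Python) =====
-- def parse_npc_environment(npc: dict) -> list[str]:
--     environment = npc['environment']
--     if environment == '':
--         return []
--     if '+' in environment:
--         environment = environment.split('+')
--     else:
--         environment = [environment]
--     environments = []
--     for env in environment:
--         if '/' in env:
--             environments.extend(env.split('/'))
--         else:
--             environments.append(env)
--     return [env.strip().capitalize() for env in environments]
-- ===== SOURCE B (Python) =====
-- def parse_npc_environment(npc: dict) -> list[str]:
--     environment = npc['environment']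
--     if environment == '':
--         return []
--     tokens = []
--     cur = []
--     for ch in environment:
--         if ch == '+' or ch == '/':
--             tokens.append(''.join(cur))
--             cur = []
--         else:
--             cur.append(ch)
--     tokens.append(''.join(cur))
--     return [t.strip().capitalize() for t in tokens]
-- ===== Notes on version B (the rewrite author's own statement) =====
-- stated objective: alternative
-- what changed: Replaces the conditional split('+') followed by a loop that conditionally extends with split('/') by a single character-level scan that cuts tokens at both '+' and '/' in one pass.
import Mathlib
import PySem

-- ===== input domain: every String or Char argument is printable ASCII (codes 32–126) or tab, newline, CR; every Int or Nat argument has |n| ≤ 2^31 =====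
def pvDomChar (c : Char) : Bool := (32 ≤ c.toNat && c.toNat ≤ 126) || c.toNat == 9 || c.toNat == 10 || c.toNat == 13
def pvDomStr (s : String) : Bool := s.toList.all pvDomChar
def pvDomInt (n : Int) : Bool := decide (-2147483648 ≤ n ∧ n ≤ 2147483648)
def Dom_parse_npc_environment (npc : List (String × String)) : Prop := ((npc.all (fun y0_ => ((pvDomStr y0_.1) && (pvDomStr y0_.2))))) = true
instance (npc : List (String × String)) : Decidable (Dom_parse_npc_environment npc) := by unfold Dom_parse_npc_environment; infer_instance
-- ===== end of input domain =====

-- B replaces the conditional split('+') plus conditional split('/') loop by a single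
-- character scan cutting tokens at '+' and '/'; objective: alternative decomposition.

-- s.capitalize(): title-case the first character, lower-case the rest — exact on ASCII
-- (title-case = upper-case there); used by both ports, as both Pythons call .capitalize().
def pyCapitalize (s : String) : String :=
  match s.toList with
  | [] => ""
  | c :: rest => String.ofList (PySem.Chars.upperChar c :: rest.map PySem.Chars.lowerChar)

-- ===== PORT A =====
def parse_npc_environment (npc : List (String × String)) : List String :=
  match npc.find? (fun p => p.1 == "environment") with
  | none => []  -- npc['environment'] raises KeyError; excluded by Pre_
  | some (_, environment) =>
    if environment == "" then []
    else
      let parts : List String :=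
        if PySem.Str.isIn "+" environment then (PySem.Str.split? environment "+").getD []
        else [environment]
      let environments : List String := parts.foldl (fun acc env =>
        if PySem.Str.isIn "/" env then acc ++ (PySem.Str.split? env "/").getD []
        else acc ++ [env]) []
      environments.map (fun env => pyCapitalize (PySem.Str.strip env))

-- ===== PORT B =====
def parse_npc_environment_alt (npc : List (String × String)) : List String :=
  match npc.find? (fun p => p.1 == "environment") with
  | none => []  -- npc['environment'] raises KeyError; excluded by Pre_
  | some (_, environment) =>
    if environment == "" then []
    else
      let st := environment.toList.foldl
        (fun (st : List (List Char) × List Char) ch =>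
          if ch == '+' || ch == '/' then (st.1 ++ [st.2], [])
          else (st.1, st.2 ++ [ch])) ([], [])
      let tokens := st.1 ++ [st.2]
      tokens.map (fun t => pyCapitalize (PySem.Str.strip (String.ofList t)))

-- ===== PRECONDITION & SPEC =====
-- Pre_ excludes only inputs where A raises KeyError: the key "environment" must be present.
def Pre_parse_npc_environment (npc : List (String × String)) : Prop :=
  npc.any (fun p => p.1 == "environment") = true
instance (npc : List (String × String)) : Decidable (Pre_parse_npc_environment npc) := by
  unfold Pre_parse_npc_environment; infer_instance

def pvWitness_parse_npc_environment : (List (String × String)) :=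
  [("environment", " forest +desert/Snow biome ")]

def Spec_parse_npc_environment (npc : List (String × String)) (out : List String) : Prop := out = parse_npc_environment_alt npc
instance (npc : List (String × String)) (out : List String) : Decidable (Spec_parse_npc_environment npc out) := by unfold Spec_parse_npc_environment; infer_instance

-- ===== CLAIM (what is proved, stated in full; the proofs are below) =====
def Claim_equal_parse_npc_environment : Prop := ∀ (npc : List (String × String)), Dom_parse_npc_environment npc → Pre_parse_npc_environment npc → Spec_parse_npc_environment npc (parse_npc_environment npc)

-- ===== LEMMAS AND PROOFS =====

-- recursive single-character splitter: tok1 a l = l split at every occurrence of a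
def tok1 (a : Char) : List Char → List (List Char)
  | [] => [[]]
  | c :: r =>
    if c = a then [] :: tok1 a r
    else
      match tok1 a r with
      | [] => [[c]]
      | t :: ts => (c :: t) :: ts

-- two-character splitter: l split at every '+' and every '/'
def tok2 : List Char → List (List Char)
  | [] => [[]]
  | c :: r =>
    if c = '+' ∨ c = '/' then [] :: tok2 r
    else
      match tok2 r with
      | [] => [[c]]
      | t :: ts => (c :: t) :: ts

theorem tok1_ne_nil (a : Char) (l : List Char) : tok1 a l ≠ [] := by
  cases l with
  | nil => simp [tok1]
  | cons c r =>
    simp only [tok1]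
    split
    · simp
    · cases tok1 a r <;> simp

theorem tok2_ne_nil (l : List Char) : tok2 l ≠ [] := by
  cases l with
  | nil => simp [tok2]
  | cons c r =>
    simp only [tok2]
    split
    · simp
    · cases tok2 r <;> simp

theorem splitOn_go_eq_tok1 (a : Char) (fuel : Nat) :
    ∀ (l cur : List Char) (acc : List (List Char)), l.length ≤ fuel →
      PySem.Chars.splitOn.go [a] fuel l cur acc
        = acc.reverse ++ (tok1 a l).modifyHead (cur.reverse ++ ·) := by
  induction fuel with
  | zero =>
    intro l cur acc h
    have : l = [] := List.eq_nil_of_length_eq_zero (Nat.le_zero.mp h)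
    subst this
    simp [PySem.Chars.splitOn.go, tok1]
  | succ n ih =>
    intro l cur acc h
    cases l with
    | nil => simp [PySem.Chars.splitOn.go, tok1]
    | cons c rest =>
      simp only [PySem.Chars.splitOn.go, List.isPrefixOf, List.length_cons] at *
      by_cases hc : a = c
      · subst hc
        simp only [beq_self_eq_true, Bool.true_and, List.isPrefixOf, if_true,
          List.length_cons, List.length_nil, List.drop_succ_cons, List.drop_zero]
        rw [ih rest [] (cur.reverse :: acc) (by omega)]
        rcases htr : tok1 a rest with _ | ⟨t, ts⟩
        · exact absurd htr (tok1_ne_nil a rest)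
        · simp [tok1, htr, List.modifyHead]
      · have hbeq : (a == c) = false := by simp [hc]
        have hca : ¬ (c = a) := fun h' => hc h'.symm
        simp only [hbeq, Bool.false_and, Bool.false_eq_true, if_false]
        rw [ih rest (c :: cur) acc (by omega)]
        simp only [tok1, if_neg hca]
        rcases he : tok1 a rest with _ | ⟨t, ts⟩
        · exact absurd he (tok1_ne_nil a rest)
        · simp [List.modifyHead]

theorem splitOn_single (a : Char) (l : List Char) :
    PySem.Chars.splitOn l [a] = tok1 a l := by
  unfold PySem.Chars.splitOn
  rw [splitOn_go_eq_tok1 a (l.length + 1) l [] [] (by omega)]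
  rcases he : tok1 a l with _ | ⟨t, ts⟩
  · exact absurd he (tok1_ne_nil a l)
  · simp [List.modifyHead]

theorem tok1_of_not_mem (a : Char) (l : List Char) (h : a ∉ l) : tok1 a l = [l] := by
  induction l with
  | nil => simp [tok1]
  | cons c r ih =>
    have hca : ¬ c = a := fun hh => h (by simp [hh])
    have hr : a ∉ r := fun hh => h (by simp [hh])
    simp [tok1, hca, ih hr]

theorem tok2_eq_flatMap (l : List Char) :
    tok2 l = (tok1 '+' l).flatMap (tok1 '/') := by
  induction l with
  | nil => simp [tok2, tok1]
  | cons c r ih =>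
    by_cases hp : c = '+'
    · subst hp
      simp [tok2, tok1, ih]
    · by_cases hs : c = '/'
      · subst hs
        have : tok2 ('/' :: r) = [] :: tok2 r := by simp [tok2]
        rw [this, ih]
        rcases he : tok1 '+' r with _ | ⟨t, ts⟩
        · exact absurd he (tok1_ne_nil '+' r)
        · simp [tok1, he, List.flatMap_cons]
      · have h2 : tok2 (c :: r) = match tok2 r with
          | [] => [[c]] | t :: ts => (c :: t) :: ts := by
          simp [tok2, hp, hs]
        rcases hr1 : tok1 '+' r with _ | ⟨t, ts⟩
        · exact absurd hr1 (tok1_ne_nil '+' r)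
        · rcases hr2 : tok1 '/' t with _ | ⟨u, us⟩
          · exact absurd hr2 (tok1_ne_nil '/' t)
          · rcases hr3 : tok2 r with _ | ⟨v, vs⟩
            · exact absurd hr3 (tok2_ne_nil r)
            · have hv : v :: vs = u :: (us ++ ts.flatMap (tok1 '/')) := by
                rw [← hr3, ih, hr1, List.flatMap_cons, hr2]; simp
              rw [h2, hr3, hv]
              simp [tok1, hp, hs, hr1, List.flatMap_cons, hr2]

theorem foldl_scan_eq_tok2 (l : List Char) :
    ∀ (ts : List (List Char)) (cur : List Char),
      (l.foldl
        (fun (st : List (List Char) × List Char) ch =>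
          if ch == '+' || ch == '/' then (st.1 ++ [st.2], [])
          else (st.1, st.2 ++ [ch])) (ts, cur)).1
      ++ [(l.foldl
        (fun (st : List (List Char) × List Char) ch =>
          if ch == '+' || ch == '/' then (st.1 ++ [st.2], [])
          else (st.1, st.2 ++ [ch])) (ts, cur)).2]
      = ts ++ (tok2 l).modifyHead (cur ++ ·) := by
  induction l with
  | nil =>
    intro ts cur
    simp [tok2, List.modifyHead]
  | cons c r ih =>
    intro ts cur
    by_cases hc : c = '+' ∨ c = '/'
    · have hb : (c == '+' || c == '/') = true := by
        rcases hc with h | h <;> simp [h]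
      simp only [List.foldl_cons, hb, if_true]
      rw [ih (ts ++ [cur]) []]
      rcases he : tok2 r with _ | ⟨t, tss⟩
      · exact absurd he (tok2_ne_nil r)
      · simp [tok2, hc, he, List.modifyHead]
    · have hb : (c == '+' || c == '/') = false := by
        push_neg at hc
        simp [hc.1, hc.2]
      simp only [List.foldl_cons, hb, Bool.false_eq_true, if_false]
      rw [ih ts (cur ++ [c])]
      rcases he : tok2 r with _ | ⟨t, tss⟩
      · exact absurd he (tok2_ne_nil r)
      · simp [tok2, hc, he, List.modifyHead]

-- A's per-element splitting, at the character level
theorem stringSplit_toList (sep : Char) (sepS : String) (hs : sepS.toList = [sep]) (env : String) :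
    ((if PySem.Str.isIn sepS env then (PySem.Str.split? env sepS).getD []
      else [env]).map String.toList) = tok1 sep env.toList := by
  by_cases h : PySem.Str.isIn sepS env = true
  · have hm := PySem.Str.split?_map env sepS
    rw [hs] at hm
    simp only [PySem.Chars.split?, List.isEmpty_cons, if_neg Bool.false_ne_true] at hm
    rcases ho : PySem.Str.split? env sepS with _ | xs
    · rw [ho] at hm; simp at hm
    · rw [ho] at hm
      simp only [Option.map_some, Option.some.injEq] at hm
      rw [if_pos h]
      simp only [Option.getD_some]
      rw [hm, splitOn_single]
  · rw [if_neg h]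
    have hinf : ¬ ([sep] <:+: env.toList) := by
      have := PySem.Str.isIn_iff_infix sepS env
      rw [hs] at this
      intro hcon
      exact h (this.mpr hcon)
    have hmem : sep ∉ env.toList := fun hm =>
      hinf ((List.singleton_infix_iff sep env.toList).mpr hm)
    rw [List.map_cons, List.map_nil, tok1_of_not_mem sep env.toList hmem]

-- ===== VERDICT (by name: the statement is the Claim_ definition above) =====
theorem parse_npc_environment_spec : Claim_equal_parse_npc_environment := by
  intro npc _ _
  unfold Spec_parse_npc_environment parse_npc_environment parse_npc_environment_alt
  cases hf : npc.find? (fun p => p.1 == "environment") with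
  | none => rfl
  | some p =>
    obtain ⟨k, environment⟩ := p
    dsimp only
    by_cases he : environment == ""
    · rw [if_pos he, if_pos he]
    · rw [if_neg he, if_neg he]
      rw [foldl_scan_eq_tok2 environment.toList [] []]
      have hfun : (fun (acc : List String) env =>
          if PySem.Str.isIn "/" env then acc ++ (PySem.Str.split? env "/").getD []
          else acc ++ [env])
        = (fun (acc : List String) env =>
            acc ++ (if PySem.Str.isIn "/" env then (PySem.Str.split? env "/").getD []
                    else [env])) := by
        funext acc env
        exact (apply_ite (fun l => acc ++ l) _ _ _).symm
      rw [hfun, PySem.List.foldl_append_eq_flatMap]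
      have hparts := stringSplit_toList '+' "+" rfl environment
      have hflat : (((if PySem.Str.isIn "+" environment then (PySem.Str.split? environment "+").getD []
            else [environment]).flatMap
            (fun env => if PySem.Str.isIn "/" env then (PySem.Str.split? env "/").getD []
                        else [env])).map String.toList)
          = tok2 environment.toList := by
        rw [List.map_flatMap, tok2_eq_flatMap, ← hparts, List.flatMap_map]
        congr 1
        funext env
        exact stringSplit_toList '/' "/" rfl env
      have hmh : (tok2 environment.toList).modifyHead (fun x => [] ++ x)
          = tok2 environment.toList := by
        cases tok2 environment.toList <;> simp [List.modifyHead]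
      rw [hmh, ← hflat]
      simp only [List.nil_append, List.map_map, Function.comp_def, String.ofList_toList]
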